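-- pv_equiv track=rewrite | github.com/pgdr/cc-degeneracy | degeneracy.py | left_neighbors
-- ===== SOURCE A (Python) =====
-- def _left_neighborhood(
--     graph: list[list[int]], V_to_idx: dict[int, int], v: int
-- ) -> list[int]:
--     lv: list[int] = []
--     for u in graph[v]:
--         if V_to_idx[u] < V_to_idx[v]:
--             lv.append(u)
--     return lv
--
-- def left_neighbors(
--     graph: list[list[int]], ordering: list[int]
-- ) -> dict[int, set[int]]:
--     L = {}
--     V_to_idx = {v: i for (i, v) in enumerate(ordering)}
--
--     for v in range(len(graph)):
--         L[v] = set(_left_neighborhood(graph, V_to_idx, v))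
--     return L, V_to_idx
-- ===== SOURCE B (Python) =====
-- def left_neighbors(graph, ordering):
--     V_to_idx = {v: i for (i, v) in enumerate(ordering)}
--     before = {}
--     seen = set()
--     for x in ordering:
--         before[x] = set(seen)
--         seen.add(x)
--     L = {v: {u for u in graph[v] if u in before[v]} for v in range(len(graph))}
--     return L, V_to_idx
-- ===== Notes on version B (the rewrite author's own statement) =====
-- stated objective: alternative
-- what changed: Instead of comparing precomputed ordering indices for every edge, B makes one pass over `ordering` maintaining a growing `seen` set and records a snapshot `before[x] = set(seen)` per vertex, so each left-neighborhood becomes a membership filter against that snapshot instead of an index comparison.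
import Mathlib
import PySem

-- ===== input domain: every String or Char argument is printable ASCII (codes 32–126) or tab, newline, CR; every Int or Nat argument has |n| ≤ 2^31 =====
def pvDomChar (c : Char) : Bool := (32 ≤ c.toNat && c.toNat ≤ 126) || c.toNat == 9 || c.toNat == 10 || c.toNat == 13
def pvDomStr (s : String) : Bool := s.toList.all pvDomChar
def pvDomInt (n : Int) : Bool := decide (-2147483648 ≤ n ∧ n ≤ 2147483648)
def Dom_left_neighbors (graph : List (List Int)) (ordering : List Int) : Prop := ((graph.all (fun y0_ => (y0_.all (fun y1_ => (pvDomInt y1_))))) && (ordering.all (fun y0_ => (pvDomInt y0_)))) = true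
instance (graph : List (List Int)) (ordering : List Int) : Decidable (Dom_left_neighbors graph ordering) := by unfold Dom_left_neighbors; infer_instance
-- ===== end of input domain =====

-- B replaces the per-edge index comparison by a single pass over `ordering` with a growing `seen` set (alternative decomposition; return value semantics unchanged on Pre_).

-- ===== PORT A =====
-- shared helper: V_to_idx = {v: i for (i, v) in enumerate(ordering)} — this exact comprehension appears in both A and B
def pvVtoIdx (ordering : List Int) : PySem.Dict Int Int :=
  (PySem.List.enumerate ordering).foldl (fun d p => d.insert p.2 p.1) PySem.Dict.empty

-- _left_neighborhood(graph, V_to_idx, v): dict lookups V_to_idx[u], V_to_idx[v] ported as getD _ 0 — exact under Pre_ (all looked-up keys present); graph[v] with v from range(len(graph)) is always in range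
def pvLeftNbhd (graph : List (List Int)) (Vidx : PySem.Dict Int Int) (v : Nat) : List Int :=
  (graph.getD v []).foldl (fun lv u => if Vidx.getD u 0 < Vidx.getD (v : Int) 0 then lv ++ [u] else lv) []

def left_neighbors (graph : List (List Int)) (ordering : List Int) : (List (Int × List Int)) × (List (Int × Int)) :=
  let Vidx := pvVtoIdx ordering
  let L := (List.range graph.length).foldl
    (fun L v => L.insert (v : Int) (PySem.Set.ofList (pvLeftNbhd graph Vidx v))) PySem.Dict.empty
  (L.items, Vidx.items)

-- ===== PORT B =====
-- one pass over ordering: before[x] = set(seen) snapshot, seen.add(x)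
def pvBefore (ordering : List Int) : PySem.Dict Int (List Int) × PySem.Set Int :=
  ordering.foldl (fun st x => (st.1.insert x st.2, PySem.Set.add st.2 x))
    (PySem.Dict.empty, PySem.Set.empty)

-- L = {v: {u for u in graph[v] if u in before[v]} for v in range(len(graph))};
-- before[v] ported as getD _ [] — exact under Pre_ (v is a key whenever graph[v] is nonempty; for an empty row the filter is vacuous)
def left_neighbors_alt (graph : List (List Int)) (ordering : List Int) : (List (Int × List Int)) × (List (Int × Int)) :=
  let Vidx := pvVtoIdx ordering
  let before := (pvBefore ordering).1
  let L := (List.range graph.length).foldl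
    (fun L v => L.insert (v : Int)
      (PySem.Set.ofList ((graph.getD v []).filter (fun u => (before.getD (v : Int) []).contains u)))) PySem.Dict.empty
  (L.items, Vidx.items)

-- ===== PRECONDITION & SPEC =====
-- First conjunct is exactly A's return condition (every looked-up key V_to_idx[v], V_to_idx[u] exists; both are consulted only
-- for a nonempty row). The second conjunct excludes orderings with duplicate vertices when the graph has an edge: there A still
-- returns, but its value hinges on the accidental last-occurrence index of the duplicate, and B disagrees.
def Pre_left_neighbors (graph : List (List Int)) (ordering : List Int) : Prop :=
  (∀ p ∈ PySem.List.enumerate graph, p.2 ≠ [] → (p.1 ∈ ordering ∧ ∀ u ∈ p.2, u ∈ ordering)) ∧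
  (ordering.Nodup ∨ ∀ row ∈ graph, row = [])
instance (graph : List (List Int)) (ordering : List Int) : Decidable (Pre_left_neighbors graph ordering) := by unfold Pre_left_neighbors; infer_instance

def pvWitness_left_neighbors : List (List Int) × List Int := ([[1], [0, 1]], [1, 0])

def Spec_left_neighbors (graph : List (List Int)) (ordering : List Int) (out : (List (Int × List Int)) × (List (Int × Int))) : Prop := out = left_neighbors_alt graph ordering
instance (graph : List (List Int)) (ordering : List Int) (out : (List (Int × List Int)) × (List (Int × Int))) : Decidable (Spec_left_neighbors graph ordering out) := by unfold Spec_left_neighbors; infer_instance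

-- ===== CLAIM (what is proved, stated in full; the proofs are below) =====
def Claim_equal_left_neighbors : Prop := ∀ (graph : List (List Int)) (ordering : List Int), Dom_left_neighbors graph ordering → Pre_left_neighbors graph ordering → Spec_left_neighbors graph ordering (left_neighbors graph ordering)

-- ===== LEMMAS AND PROOFS =====

theorem pv_vidx_items (ordering : List Int) (h : ordering.Nodup) :
    (pvVtoIdx ordering).items = (PySem.List.enumerate ordering).map (fun p => (p.2, p.1)) := by
  unfold pvVtoIdx
  have h1 : ∀ a ∈ PySem.List.enumerate ordering, (PySem.Dict.empty : PySem.Dict Int Int).contains a.2 = false := by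
    intro a _; exact PySem.Dict.contains_empty _
  have h2 : ((PySem.List.enumerate ordering).map (fun p => p.2)).Nodup := by
    rw [PySem.List.map_snd_enumerate]; exact h
  have := PySem.Dict.items_foldl_insert_fresh (PySem.List.enumerate ordering)
      (fun p => p.2) (fun p => p.1) PySem.Dict.empty h1 h2
  simpa using this

theorem pv_vidx_getD (ordering : List Int) (h : ordering.Nodup) (w : Int) (hw : w ∈ ordering) :
    (pvVtoIdx ordering).getD w 0 = (ordering.idxOf w : Int) := by
  have hlt : ordering.idxOf w < ordering.length := List.idxOf_lt_length_of_mem hw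
  have hmem : ((w, (ordering.idxOf w : Int)) : Int × Int) ∈ (pvVtoIdx ordering).items := by
    rw [pv_vidx_items ordering h]
    refine List.mem_map.2 ⟨((ordering.idxOf w : Int), w), ?_, rfl⟩
    rw [PySem.List.mem_enumerate_iff]
    exact ⟨ordering.idxOf w, hlt, by simp [List.getElem_idxOf hlt]⟩
  have hkeys : (pvVtoIdx ordering).keys.Nodup := by
    have : (pvVtoIdx ordering).keys = (PySem.List.enumerate ordering).map (fun p => p.2) := by
      simp only [PySem.Dict.keys, pv_vidx_items ordering h, List.map_map]
      rfl
    rw [this, PySem.List.map_snd_enumerate]; exact h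
  exact PySem.Dict.getD_of_mem_items _ hmem hkeys 0

theorem pv_mem_take_iff (l : List Int) (h : l.Nodup) (u : Int) (hu : u ∈ l) (k : Nat) :
    u ∈ l.take k ↔ l.idxOf u < k := by
  constructor
  · intro hmem
    obtain ⟨i, hik, hi⟩ := List.mem_take_iff_getElem.1 hmem
    have hil : i < l.length := lt_of_lt_of_le (lt_min_iff.1 hik).2 le_rfl
    have : l.idxOf u = i := by
      have := List.Nodup.idxOf_getElem h i hil
      rwa [hi] at this
    exact this ▸ (lt_min_iff.1 hik).1
  · intro hk
    have hlt : l.idxOf u < l.length := List.idxOf_lt_length_of_mem hu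
    exact List.mem_take_iff_getElem.2 ⟨l.idxOf u, lt_min_iff.2 ⟨hk, hlt⟩, List.getElem_idxOf hlt⟩

theorem pv_before_frozen (l : List Int)
    (d : PySem.Dict Int (List Int)) (s : PySem.Set Int) (v : Int) (hv : v ∉ l) (x : List Int) :
    ((l.foldl (fun st w => (st.1.insert w st.2, PySem.Set.add st.2 w)) (d, s)).1).getD v x
      = d.getD v x := by
  induction l generalizing d s with
  | nil => rfl
  | cons a as ih =>
    have hva : v ≠ a := fun h => hv (h ▸ List.mem_cons_self)
    have hvas : v ∉ as := fun h => hv (List.mem_cons_of_mem _ h)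
    simp only [List.foldl_cons]
    rw [ih _ _ hvas, PySem.Dict.getD_insert]
    simp [hva]

theorem pv_before_getD (l pre : List Int)
    (d : PySem.Dict Int (List Int)) (h : (pre ++ l).Nodup) (v : Int) (hv : v ∈ l) :
    ((l.foldl (fun st w => (st.1.insert w st.2, PySem.Set.add st.2 w)) (d, (pre : PySem.Set Int))).1).getD v []
      = pre ++ l.take (l.idxOf v) := by
  induction l generalizing pre d with
  | nil => cases hv
  | cons a as ih =>
    have hna : a ∉ pre := by
      have := (List.nodup_append.1 h).2.2
      intro hmem; exact this a hmem a List.mem_cons_self rfl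
    have hadd : PySem.Set.add (pre : PySem.Set Int) a = ((pre ++ [a] : List Int) : PySem.Set Int) := by
      simp [PySem.Set.add, PySem.Set.contains, hna]
    simp only [List.foldl_cons, hadd]
    rcases List.mem_cons.1 hv with hva | hvas
    · subst hva
      have hvnotas : v ∉ as := by
        have : (v :: as).Nodup := (List.nodup_append.1 h).2.1
        exact (List.nodup_cons.1 this).1
      rw [pv_before_frozen as _ _ v hvnotas, PySem.Dict.getD_insert]
      simp
    · have hvne : v ≠ a := by
        have hnodup : (a :: as).Nodup := (List.nodup_append.1 h).2.1
        intro hEq; exact (List.nodup_cons.1 hnodup).1 (hEq ▸ hvas)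
      have h' : ((pre ++ [a]) ++ as).Nodup := by
        rwa [List.append_assoc, List.singleton_append]
      rw [ih (pre ++ [a]) _ h' hvas]
      have hidx : (a :: as).idxOf v = as.idxOf v + 1 := by
        simp [hvne.symm]
      rw [hidx]
      simp [List.take_succ_cons, List.append_assoc]

theorem pv_per_vertex (graph : List (List Int)) (ordering : List Int)
    (hP : Pre_left_neighbors graph ordering) (v : Nat) (hv : v < graph.length) :
    PySem.Set.ofList (pvLeftNbhd graph (pvVtoIdx ordering) v)
      = PySem.Set.ofList ((graph.getD v []).filter
          (fun u => (((pvBefore ordering).1).getD (v : Int) []).contains u)) := by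
  obtain ⟨hkeys, hdup⟩ := hP
  have hrowA : graph.getD v [] = graph[v] := by
    simp [List.getD_eq_getElem?_getD, List.getElem?_eq_getElem hv]
  unfold pvLeftNbhd
  rw [PySem.List.foldl_append_ite_eq_filter
    (fun u => (pvVtoIdx ordering).getD u 0 < (pvVtoIdx ordering).getD (v : Int) 0), hrowA,
    List.nil_append]
  by_cases hrow : graph[v] = []
  · rw [hrow]; rfl
  · have hkv := hkeys ((v : Int), graph[v]) (by
      rw [PySem.List.mem_enumerate_iff]
      exact ⟨v, hv, by simp⟩) hrow
    obtain ⟨hvm, hall⟩ := hkv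
    have hnd : ordering.Nodup := by
      rcases hdup with hnd | hemp
      · exact hnd
      · exact absurd (hemp graph[v] (List.getElem_mem hv)) hrow
    have hbef : ((pvBefore ordering).1).getD (v : Int) [] = ordering.take (ordering.idxOf (v : Int)) := by
      have := pv_before_getD ordering [] PySem.Dict.empty (by simpa using hnd) (v : Int) hvm
      simpa using this
    rw [hbef]
    congr 1
    refine List.filter_congr ?_
    intro u hu
    have hum : u ∈ ordering := hall u hu
    rw [pv_vidx_getD ordering hnd u hum, pv_vidx_getD ordering hnd (v : Int) hvm]
    have : (ordering.take (ordering.idxOf (v : Int))).contains u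
        = decide (ordering.idxOf u < ordering.idxOf (v : Int)) := by
      simp [pv_mem_take_iff ordering hnd u hum]
    rw [this]
    simp

-- ===== VERDICT (by name: the statement is the Claim_ definition above) =====
theorem left_neighbors_spec : Claim_equal_left_neighbors := by
  intro graph ordering _hD hP
  unfold Spec_left_neighbors left_neighbors left_neighbors_alt
  have hnodup : ((List.range graph.length).map (fun v : Nat => (v : Int))).Nodup :=
    List.nodup_range.map (fun a b h => by simpa using h)
  have hA := PySem.Dict.items_foldl_insert_fresh (List.range graph.length)
    (fun v : Nat => (v : Int))
    (fun v => PySem.Set.ofList (pvLeftNbhd graph (pvVtoIdx ordering) v))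
    PySem.Dict.empty (fun a _ => PySem.Dict.contains_empty _) hnodup
  have hB := PySem.Dict.items_foldl_insert_fresh (List.range graph.length)
    (fun v : Nat => (v : Int))
    (fun v => PySem.Set.ofList ((graph.getD v []).filter
      (fun u => (((pvBefore ordering).1).getD (v : Int) []).contains u)))
    PySem.Dict.empty (fun a _ => PySem.Dict.contains_empty _) hnodup
  dsimp only
  rw [hA, hB]
  refine congrArg₂ Prod.mk ?_ rfl
  refine List.map_congr_left ?_
  intro v hv
  have hvn : v < graph.length := List.mem_range.1 hv
  exact congrArg _ (pv_per_vertex graph ordering hP v hvn)
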